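-- pv_equiv track=rewrite | github.com/himkt/problems.2019 | topcoder/SRM/0723/a.py | check
-- ===== SOURCE A (Python) =====
-- def check(s):
--     if s[0] == ' ' or s[-1] == ' ':
--         return 'Not good'
--
--     else:
--         for s_ in s.split(' '):
--             if s_ != 'buffalo':
--                 return 'Not good'
--
--     return 'Good'
-- ===== SOURCE B (Python) =====
-- def check(s):
--     # Construct-and-compare: a valid string of k words has length 8*k - 1,
--     # so recover k from the length and compare with the canonical string.
--     k, r = divmod(len(s) + 1, 8)
--     if r == 0 and k >= 1 and s == ' '.join(['buffalo'] * k):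
--         return 'Good'
--     return 'Not good'
-- ===== Notes on version B (the rewrite author's own statement) =====
-- stated objective: alternative
-- what changed: B replaces A's split-and-loop token validation by construct-and-compare: it recovers the word count k from len(s)+1 = 8k and compares s against the single canonical space-joined string of k buffalo words; Pre_ excludes only the empty string, on which A raises IndexError.
import Mathlib
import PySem

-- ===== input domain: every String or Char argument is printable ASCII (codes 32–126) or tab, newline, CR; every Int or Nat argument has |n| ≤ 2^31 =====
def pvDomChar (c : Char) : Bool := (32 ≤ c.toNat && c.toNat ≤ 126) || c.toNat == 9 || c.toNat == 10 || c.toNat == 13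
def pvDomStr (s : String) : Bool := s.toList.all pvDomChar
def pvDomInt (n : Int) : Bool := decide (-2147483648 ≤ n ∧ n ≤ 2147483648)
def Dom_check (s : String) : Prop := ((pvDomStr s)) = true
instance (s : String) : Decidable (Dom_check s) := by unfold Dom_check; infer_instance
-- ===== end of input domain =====

-- B replaces A's split-and-loop token validation by construct-and-compare (recover the
-- word count from the length and compare with the canonical joined string); objective: alternative.


-- ===== PORT A =====
-- the for-loop over s.split(' ')
def checkLoop : List String → String
  | [] => "Good"
  | t :: ts => if t ≠ "buffalo" then "Not good" else checkLoop ts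

def check (s : String) : String :=
  match PySem.Str.pyGet? s 0, PySem.Str.pyGet? s (-1) with
  | some c0, some cn =>
    if c0 = ' ' ∨ cn = ' ' then "Not good"
    else
      match PySem.Str.split? s " " with
      | some toks => checkLoop toks
      | none => "Not good"          -- unreachable: the separator " " is nonempty
  | _, _ => "Not good"              -- s = "": Python raises IndexError here (outside Pre_check)

-- ===== PORT B =====
def check_alt (s : String) : String :=
  let n : Int := PySem.Str.len s
  let k : Int := PySem.Int.floordiv (n + 1) 8
  let r : Int := PySem.Int.mod (n + 1) 8
  if r = 0 ∧ 1 ≤ k ∧ s = PySem.Str.join " " (List.replicate k.toNat "buffalo") then "Good"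
  else "Not good"

-- ===== PRECONDITION & SPEC =====
-- Pre_ excludes only the empty string, on which A raises IndexError at s[0].
def Pre_check (s : String) : Prop := s ≠ ""
instance (s : String) : Decidable (Pre_check s) := by unfold Pre_check; infer_instance
def pvWitness_check : String := "buffalo buffalo"

def Spec_check (s : String) (out : String) : Prop := out = check_alt s
instance (s : String) (out : String) : Decidable (Spec_check s out) := by unfold Spec_check; infer_instance

-- ===== CLAIM (what is proved, stated in full; the proofs are below) =====
def Claim_equal_check : Prop := ∀ (s : String), Dom_check s → Pre_check s → Spec_check s (check s)

-- ===== LEMMAS AND PROOFS =====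

-- PySem's fuel-based splitOn on a single-char separator is Mathlib's List.splitOn.
theorem splitOn_go_eq (c : Char) (fuel : Nat) (l cur : List Char) (acc : List (List Char))
    (h : l.length < fuel) :
    PySem.Chars.splitOn.go [c] fuel l cur acc
      = acc.reverse ++ (List.splitOn c l).modifyHead (cur.reverse ++ ·) := by
  induction fuel generalizing l cur acc with
  | zero => omega
  | succ fuel ih =>
    cases l with
    | nil =>
      simp [PySem.Chars.splitOn.go, List.splitOn, List.splitOnP_nil]
    | cons x rest =>
      by_cases hx : x = c
      · subst hx
        simp only [PySem.Chars.splitOn.go, List.isPrefixOf, beq_self_eq_true]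
        rw [if_pos (by simp)]
        simp only [List.length_cons, List.length_nil, Nat.zero_add, List.drop_succ_cons,
          List.drop_zero]
        rw [ih rest [] (cur.reverse :: acc) (by simpa using Nat.lt_of_succ_lt_succ h)]
        simp [List.splitOn, List.splitOnP_cons]
        cases hsp : List.splitOnP (· == x) rest with
        | nil => exact absurd hsp (List.splitOnP_ne_nil _ _)
        | cons t ts => simp
      · simp only [PySem.Chars.splitOn.go, List.isPrefixOf]
        rw [if_neg (by simp; exact fun hcx => absurd hcx.symm hx)]
        rw [ih rest (x :: cur) acc (Nat.lt_of_succ_lt_succ h)]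
        simp [List.splitOn, List.splitOnP_cons, hx]
        cases hsp : List.splitOnP (· == c) rest with
        | nil => exact absurd hsp (List.splitOnP_ne_nil _ _)
        | cons t ts => simp

theorem splitOn_single (c : Char) (l : List Char) :
    PySem.Chars.splitOn l [c] = List.splitOn c l := by
  rw [PySem.Chars.splitOn, splitOn_go_eq c (l.length + 1) l [] [] (Nat.lt_succ_self _)]
  cases hsp : List.splitOn c l with
  | nil => exact absurd hsp (List.splitOnP_ne_nil _ _)
  | cons t ts => simp

-- the loop returns "Good" exactly when every token is "buffalo" (and only two values at all)
theorem checkLoop_eq_good (ts : List String) :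
    checkLoop ts = "Good" ↔ ∀ t ∈ ts, t = "buffalo" := by
  induction ts with
  | nil => simp [checkLoop]
  | cons t ts ih =>
    by_cases ht : t = "buffalo"
    · simp [checkLoop, ht, ih]
    · simp [checkLoop, ht]

theorem checkLoop_ne (ts : List String) (h : checkLoop ts ≠ "Good") :
    checkLoop ts = "Not good" := by
  induction ts with
  | nil => simp [checkLoop] at h
  | cons t ts ih =>
    by_cases ht : t = "buffalo"
    · simp only [checkLoop, ht, ne_eq, not_true_eq_false, if_false] at h ⊢
      exact ih h
    · simp [checkLoop, ht]

def buf : List Char := "buffalo".toList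

theorem inter_cons (w u : List Char) (l : List (List Char)) :
    [' '].intercalate (w :: u :: l) = w ++ ' ' :: [' '].intercalate (u :: l) := by
  simp [List.intercalate, List.intersperse]

theorem last_inter (k : Nat) (hk : 1 ≤ k) :
    ([' '].intercalate (List.replicate k buf)).getLast? = some 'o' := by
  induction k with
  | zero => omega
  | succ k ih =>
    cases k with
    | zero => decide
    | succ m =>
      rw [List.replicate_succ, List.replicate_succ, inter_cons buf buf (List.replicate m buf),
        ← List.replicate_succ, List.getLast?_append,
        show (' ' :: [' '].intercalate (List.replicate (m + 1) buf))
            = [' '] ++ [' '].intercalate (List.replicate (m + 1) buf) from rfl,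
        List.getLast?_append, ih (by omega)]
      rfl

theorem length_inter (k : Nat) :
    ([' '].intercalate (List.replicate (k + 1) buf)).length = 8 * (k + 1) - 1 := by
  induction k with
  | zero => decide
  | succ m ih =>
    rw [List.replicate_succ, List.replicate_succ, inter_cons buf buf (List.replicate m buf),
      ← List.replicate_succ]
    simp only [List.length_append, List.length_cons, ih]
    simp [buf]
    omega

-- the canonical valid string of k words
theorem join_toList (k : Nat) :
    (PySem.Str.join " " (List.replicate k "buffalo")).toList
      = [' '].intercalate (List.replicate k buf) := by
  simp [PySem.Str.join, PySem.Chars.join, String.toList_ofList]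
  rfl

theorem check_alt_cases (s : String) :
    check_alt s = "Good" ∨ check_alt s = "Not good" := by
  unfold check_alt
  dsimp only
  split_ifs <;> simp

theorem check_cases (s : String) :
    check s = "Good" ∨ check s = "Not good" := by
  unfold check
  cases PySem.Str.pyGet? s 0 with
  | none => simp
  | some c0 =>
    cases PySem.Str.pyGet? s (-1) with
    | none => simp
    | some cn =>
      dsimp only
      split_ifs with h
      · simp
      · cases hsp : PySem.Str.split? s " " with
        | none => simp
        | some toks =>
          simp only
          by_cases hg : checkLoop toks = "Good"
          · exact Or.inl hg
          · exact Or.inr (checkLoop_ne _ hg)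

-- both guards and tokens in terms of s.toList
theorem split?_eq (s : String) :
    PySem.Str.split? s " " = some ((List.splitOn ' ' s.toList).map String.ofList) := by
  simp [PySem.Str.split?, PySem.Chars.split?, splitOn_single]

theorem check_good_iff (s : String) (hs : s ≠ "") :
    check s = "Good" ↔ ∀ t ∈ List.splitOn ' ' s.toList, t = buf := by
  have hne : s.toList ≠ [] := fun h => hs (by
    have := congrArg String.ofList h
    simpa [String.ofList_toList] using this)
  obtain ⟨a, l, hal⟩ := List.exists_cons_of_ne_nil hne
  have h0 : PySem.Str.pyGet? s 0 = some a := by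
    simp [PySem.Str.pyGet?_eq, hal]
  have hlast : PySem.Str.pyGet? s (-1) = some ((a :: l).getLast (by simp)) := by
    simp only [PySem.Str.pyGet?_eq, PySem.Chars.pyGet?_eq_listPyGet?, hal]
    simp [PySem.List.pyGet?, PySem.List.pyIdx?]
    simp [List.getLast_eq_getElem]
    rfl
  unfold check
  rw [h0, hlast, split?_eq]
  dsimp only
  by_cases hg : a = ' ' ∨ (a :: l).getLast (by simp) = ' '
  · rw [if_pos hg]
    constructor
    · intro h; exact absurd h (by decide)
    · intro hall
      exfalso
      rcases hg with hg | hg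
      · -- first token is [] but must be buf
        have h1 : [] ∈ List.splitOn ' ' s.toList := by
          rw [hal, hg, List.splitOn, List.splitOnP_cons]
          simp
        exact absurd (hall [] h1) (by decide)
      · -- last char is ' ': then s.toList = intercalate of tokens, whose last char is 'o'
        have hall' := hall
        have hnenil := List.splitOnP_ne_nil (fun x => x == ' ') s.toList
        have hrep : List.splitOn ' ' s.toList
            = List.replicate (List.splitOn ' ' s.toList).length buf := by
          apply List.eq_replicate_of_mem
          exact hall
        have hinter := List.intercalate_splitOn s.toList ' '
        rw [hrep] at hinter
        have hlen1 : 1 ≤ (List.splitOn ' ' s.toList).length :=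
          Nat.one_le_iff_ne_zero.mpr (by simpa using hnenil)
        have hlast' : s.toList.getLast? = some 'o' := by
          rw [← hinter]; exact last_inter _ hlen1
        have : s.toList.getLast? = some ' ' := by
          rw [hal]
          rw [List.getLast?_eq_some_getLast (by simp), hg]
        rw [this] at hlast'
        exact absurd hlast' (by decide)
  · rw [if_neg hg]
    rw [checkLoop_eq_good]
    constructor
    · intro h t ht
      have := h (String.ofList t) (List.mem_map_of_mem ht)
      have : t = "buffalo".toList := by
        have h2 := congrArg String.toList this
        simpa [String.toList_ofList] using h2
      exact this
    · intro h t ht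
      obtain ⟨u, hu, rfl⟩ := List.mem_map.mp ht
      rw [h u hu]
      rfl

theorem check_alt_good_iff (s : String) :
    check_alt s = "Good" ↔ ∀ t ∈ List.splitOn ' ' s.toList, t = buf := by
  unfold check_alt
  dsimp only
  simp only [PySem.Str.len, PySem.Int.floordiv, PySem.Int.mod]
  constructor
  · intro h
    split_ifs at h with hc
    · obtain ⟨hr, hk, hjoin⟩ := hc
      -- s is the canonical string of k words; its splitOn is replicate k buf
      set n : Int := (s.toList.length : Int) with hn
      set k : Int := (n + 1).fdiv 8 with hk8
      have hkpos : 1 ≤ k.toNat := by omega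
      have hsl : s.toList = [' '].intercalate (List.replicate k.toNat buf) := by
        rw [hjoin, join_toList]
      rw [hsl]
      rw [List.splitOn_intercalate _ _ (by
          intro l hl
          rw [List.eq_of_mem_replicate hl]
          decide)
        (by
          intro hnil
          have := congrArg List.length hnil
          simp at this
          omega)]
      intro t ht
      exact List.eq_of_mem_replicate ht
    · exact absurd h (by decide)
  · intro hall
    have hnenil := List.splitOnP_ne_nil (fun x => x == ' ') s.toList
    have hrep : List.splitOn ' ' s.toList
        = List.replicate (List.splitOn ' ' s.toList).length buf :=
      List.eq_replicate_of_mem hall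
    have hinter := List.intercalate_splitOn s.toList ' '
    rw [hrep] at hinter
    obtain ⟨m', hm'⟩ : ∃ m', (List.splitOn ' ' s.toList).length = m' + 1 := by
      have hz : (List.splitOn ' ' s.toList).length ≠ 0 := by simpa using hnenil
      exact ⟨(List.splitOn ' ' s.toList).length - 1, by omega⟩
    rw [hm'] at hinter
    have hlen : s.toList.length = 8 * (m' + 1) - 1 := by
      rw [← hinter]; exact length_inter m'
    have hlen' : (s.toList.length : Int) + 1 = 8 * (m' + 1 : Int) := by omega
    have hfd : ((s.toList.length : Int) + 1).fdiv 8 = (m' + 1 : Int) := by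
      rw [hlen', Int.mul_fdiv_cancel_left _ (by norm_num)]
    have hfm : ((s.toList.length : Int) + 1).fmod 8 = 0 := by
      rw [hlen', Int.mul_fmod_right]
    rw [if_pos]
    refine ⟨hfm, by rw [hfd]; omega, ?_⟩
    · apply String.toList_inj.mp
      rw [hfd, show ((m' : Int) + 1).toNat = m' + 1 from by omega, join_toList]
      exact hinter.symm

-- ===== VERDICT (by name: the statement is the Claim_ definition above) =====
theorem check_spec : Claim_equal_check := by
  intro s _ hs
  unfold Spec_check
  have h1 := check_good_iff s hs
  have h2 := check_alt_good_iff s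
  rcases check_cases s with hA | hA <;> rcases check_alt_cases s with hB | hB
  · rw [hA, hB]
  · exfalso
    have := h2.mpr (h1.mp hA)
    rw [hB] at this; exact absurd this (by decide)
  · exfalso
    have := h1.mpr (h2.mp hB)
    rw [hA] at this; exact absurd this (by decide)
  · rw [hA, hB]
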